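-- pv_equiv track=rewrite | github.com/ballales1984-wq/-mente-vita-artificiale | moduli/meta_ragionamento.py | identifica_argomento
-- ===== SOURCE A (Python) =====
-- from typing import Dict, List, Optional
--
-- def identifica_argomento(situazione: Dict) -> str:
--     """Identifica l'argomento principale della situazione"""
--     # Combina info per creare argomento
--     entita = 'generico'
--     azione = 'osservazione'
--
--     desc = situazione.get('descrizione', '').lower()
--     if 'person' in desc or 'persona' in desc:
--         entita = 'persona'
--     elif 'car' in desc or 'veicolo' in desc:
--         entita = 'veicolo'
--     elif 'animal' in desc:
--         entita = 'animale'
--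
--     audio = situazione.get('audio', '').lower()
--     if any(w in audio for w in ['vieni', 'avvicinati']):
--         azione = 'avvicinamento'
--     elif any(w in audio for w in ['fermati', 'stop']):
--         azione = 'arresto'
--     elif any(w in audio for w in ['ciao', 'salve']):
--         azione = 'saluto'
--
--     return f"{entita}_{azione}"
-- ===== SOURCE B (Python) =====
-- # B: instead of an ordered elif chain taking the first match, index every keyword
-- # to (priority, label), collect ALL keywords occurring in the text, and take the
-- # minimum-priority hit (priorities mirror A's rule order, so the result agrees).
--
-- _ENT = {'person': (0, 'persona'), 'persona': (0, 'persona'),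
--         'car': (1, 'veicolo'), 'veicolo': (1, 'veicolo'),
--         'animal': (2, 'animale')}
-- _ACT = {'vieni': (0, 'avvicinamento'), 'avvicinati': (0, 'avvicinamento'),
--         'fermati': (1, 'arresto'), 'stop': (1, 'arresto'),
--         'ciao': (2, 'saluto'), 'salve': (2, 'saluto')}
--
-- def _best(text, table, default):
--     hits = [pl for kw, pl in table.items() if kw in text]
--     return min(hits)[1] if hits else default
--
-- def identifica_argomento(situazione):
--     entita = _best(situazione.get('descrizione', '').lower(), _ENT, 'generico')
--     azione = _best(situazione.get('audio', '').lower(), _ACT, 'osservazione')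
--     return f"{entita}_{azione}"
-- ===== Notes on version B (the rewrite author's own statement) =====
-- stated objective: alternative
-- what changed: Replaced the first-match if/elif chains by a keyword->(priority,label) dictionary: B collects every keyword occurring in the text and returns the label of the minimum-priority hit (min over tuples), falling back to the default when nothing matches.
import Mathlib
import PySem

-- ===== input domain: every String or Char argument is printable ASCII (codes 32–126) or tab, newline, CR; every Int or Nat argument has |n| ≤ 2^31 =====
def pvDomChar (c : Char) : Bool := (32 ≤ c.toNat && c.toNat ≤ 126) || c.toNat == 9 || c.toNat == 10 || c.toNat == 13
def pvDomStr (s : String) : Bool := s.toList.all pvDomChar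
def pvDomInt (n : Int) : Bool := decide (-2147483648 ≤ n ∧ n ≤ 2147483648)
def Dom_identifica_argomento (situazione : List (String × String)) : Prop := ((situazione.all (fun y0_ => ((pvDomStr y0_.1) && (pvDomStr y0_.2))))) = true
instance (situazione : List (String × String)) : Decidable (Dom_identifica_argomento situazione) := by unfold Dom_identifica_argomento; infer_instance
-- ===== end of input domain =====

-- B replaces the first-match elif chains by a keyword->(priority,label) index: it collects
-- ALL matching keywords and takes the minimum-priority hit (objective: alternative).

-- ===== PORT A =====
def identifica_argomento (situazione : List (String × String)) : String :=
  let desc := PySem.Str.lower ((PySem.Dict.mk situazione).getD "descrizione" "")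
  let entita : String :=
    if PySem.Str.isIn "person" desc || PySem.Str.isIn "persona" desc then "persona"
    else if PySem.Str.isIn "car" desc || PySem.Str.isIn "veicolo" desc then "veicolo"
    else if PySem.Str.isIn "animal" desc then "animale"
    else "generico"
  let audio := PySem.Str.lower ((PySem.Dict.mk situazione).getD "audio" "")
  let azione : String :=
    if (["vieni", "avvicinati"] : List String).any (fun w => PySem.Str.isIn w audio) then "avvicinamento"
    else if (["fermati", "stop"] : List String).any (fun w => PySem.Str.isIn w audio) then "arresto"
    else if (["ciao", "salve"] : List String).any (fun w => PySem.Str.isIn w audio) then "saluto"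
    else "osservazione"
  entita ++ "_" ++ azione

-- ===== PORT B =====
-- keyword -> (priority, label) tables (Source B's _ENT / _ACT dicts, in insertion order)
def pvEnt : List (String × (Int × String)) :=
  [("person", (0, "persona")), ("persona", (0, "persona")),
   ("car", (1, "veicolo")), ("veicolo", (1, "veicolo")),
   ("animal", (2, "animale"))]
def pvAct : List (String × (Int × String)) :=
  [("vieni", (0, "avvicinamento")), ("avvicinati", (0, "avvicinamento")),
   ("fermati", (1, "arresto")), ("stop", (1, "arresto")),
   ("ciao", (2, "saluto")), ("salve", (2, "saluto"))]

-- Python tuple '<' on (int, str), lexicographic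
def pvTupLt (a b : Int × String) : Bool := a.1 < b.1 || (a.1 == b.1 && a.2 < b.2)

-- min(hits) : Python min keeps the FIRST minimal element
def pvMin (h : Int × String) (t : List (Int × String)) : Int × String :=
  t.foldl (fun acc x => if pvTupLt x acc then x else acc) h

-- Source B's _best
def pvBest (text : String) (table : List (String × (Int × String))) (dflt : String) : String :=
  let hits := (table.filter (fun kv => PySem.Str.isIn kv.1 text)).map (·.2)
  match hits with
  | [] => dflt
  | h :: t => (pvMin h t).2

def identifica_argomento_alt (situazione : List (String × String)) : String :=
  let entita := pvBest (PySem.Str.lower ((PySem.Dict.mk situazione).getD "descrizione" "")) pvEnt "generico"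
  let azione := pvBest (PySem.Str.lower ((PySem.Dict.mk situazione).getD "audio" "")) pvAct "osservazione"
  entita ++ "_" ++ azione

-- ===== PRECONDITION & SPEC =====
def Spec_identifica_argomento (situazione : List (String × String)) (out : String) : Prop := out = identifica_argomento_alt situazione
instance (situazione : List (String × String)) (out : String) : Decidable (Spec_identifica_argomento situazione out) := by unfold Spec_identifica_argomento; infer_instance

-- ===== CLAIM (what is proved, stated in full; the proofs are below) =====
def Claim_equal_identifica_argomento : Prop := ∀ (situazione : List (String × String)), Dom_identifica_argomento situazione → Spec_identifica_argomento situazione (identifica_argomento situazione)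

-- ===== LEMMAS AND PROOFS =====
theorem pvBest_ent (t : String) :
    pvBest t pvEnt "generico" =
      (if PySem.Str.isIn "person" t || PySem.Str.isIn "persona" t then "persona"
       else if PySem.Str.isIn "car" t || PySem.Str.isIn "veicolo" t then "veicolo"
       else if PySem.Str.isIn "animal" t then "animale"
       else "generico") := by
  unfold pvBest pvEnt
  cases h1 : PySem.Str.isIn "person" t <;>
  cases h2 : PySem.Str.isIn "persona" t <;>
  cases h3 : PySem.Str.isIn "car" t <;>
  cases h4 : PySem.Str.isIn "veicolo" t <;>
  cases h5 : PySem.Str.isIn "animal" t <;>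
    simp [h1, h2, h3, h4, h5, pvMin, pvTupLt, -PySem.Str.isIn_eq]

theorem pvBest_act (t : String) :
    pvBest t pvAct "osservazione" =
      (if (["vieni", "avvicinati"] : List String).any (fun w => PySem.Str.isIn w t) then "avvicinamento"
       else if (["fermati", "stop"] : List String).any (fun w => PySem.Str.isIn w t) then "arresto"
       else if (["ciao", "salve"] : List String).any (fun w => PySem.Str.isIn w t) then "saluto"
       else "osservazione") := by
  unfold pvBest pvAct
  cases h1 : PySem.Str.isIn "vieni" t <;>
  cases h2 : PySem.Str.isIn "avvicinati" t <;>
  cases h3 : PySem.Str.isIn "fermati" t <;>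
  cases h4 : PySem.Str.isIn "stop" t <;>
  cases h5 : PySem.Str.isIn "ciao" t <;>
  cases h6 : PySem.Str.isIn "salve" t <;>
    simp [h1, h2, h3, h4, h5, h6, pvMin, pvTupLt, -PySem.Str.isIn_eq]

-- ===== VERDICT (by name: the statement is the Claim_ definition above) =====
theorem identifica_argomento_spec : Claim_equal_identifica_argomento := by
  intro s _
  unfold Spec_identifica_argomento identifica_argomento identifica_argomento_alt
  rw [pvBest_ent, pvBest_act]
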